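-- pv_equiv track=rewrite | github.com/soheeeeP/Algorithm | src/programmers/Lv2_폰켓몬.py | solution
-- ===== SOURCE A (Python) =====
-- def solution(nums):
--     answer = 0
--     length = len(nums) // 2
--     nums_set = list(set(nums))
--
--     for x in nums_set:
--         if answer < length:
--             answer += 1
--
--     return answer
-- ===== SOURCE B (Python) =====
-- def solution(nums):
--     return min(len(set(nums)), len(nums) // 2)
-- ===== Notes on version B (the rewrite author's own statement) =====
-- stated objective: simpler
-- what changed: Replaces the capped counting loop over the deduplicated list by the closed form min(len(set(nums)), len(nums)//2).
import Mathlib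
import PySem

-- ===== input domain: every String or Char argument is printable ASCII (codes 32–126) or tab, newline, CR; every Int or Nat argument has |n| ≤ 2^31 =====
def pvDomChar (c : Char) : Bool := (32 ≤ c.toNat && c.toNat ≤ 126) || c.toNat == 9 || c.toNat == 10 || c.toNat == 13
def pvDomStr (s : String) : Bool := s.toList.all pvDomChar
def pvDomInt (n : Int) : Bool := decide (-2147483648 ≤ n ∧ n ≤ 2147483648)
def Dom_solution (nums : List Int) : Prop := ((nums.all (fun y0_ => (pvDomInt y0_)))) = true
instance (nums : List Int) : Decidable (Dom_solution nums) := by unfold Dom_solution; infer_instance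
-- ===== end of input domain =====

-- B replaces A's capped counting loop over the deduplicated list by the closed form min(#distinct, len//2); objective: simpler.


-- ===== PORT A =====
-- answer starts at 0; length = len(nums)//2; loop over list(set(nums)) incrementing while answer < length.
-- (The loop's result does not depend on the set's iteration order, so PySem.Set.ofList is exact here.)
def solution (nums : List Int) : Int :=
  let length : Int := PySem.Int.floordiv (nums.length : Int) 2
  let nums_set : List Int := PySem.Set.ofList nums
  nums_set.foldl (fun answer _ => if answer < length then answer + 1 else answer) 0

-- ===== PORT B =====
def solution_alt (nums : List Int) : Int :=
  min ((PySem.Set.ofList nums).length : Int) (PySem.Int.floordiv (nums.length : Int) 2)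

-- ===== PRECONDITION & SPEC =====
def Spec_solution (nums : List Int) (out : Int) : Prop := out = solution_alt nums
instance (nums : List Int) (out : Int) : Decidable (Spec_solution nums out) := by unfold Spec_solution; infer_instance

-- ===== CLAIM (what is proved, stated in full; the proofs are below) =====
def Claim_equal_solution : Prop := ∀ (nums : List Int), Dom_solution nums → Spec_solution nums (solution nums)

-- ===== LEMMAS AND PROOFS =====
theorem capped_count_foldl (L : Int) (s : List Int) :
    ∀ a : Int, a ≤ L →
      s.foldl (fun answer _ => if answer < L then answer + 1 else answer) a
        = min (a + (s.length : Int)) L := by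
  induction s with
  | nil => intro a ha; simp; omega
  | cons x t ih =>
    intro a ha
    simp only [List.foldl_cons]
    by_cases h : a < L
    · rw [if_pos h, ih (a + 1) (by omega)]
      simp only [List.length_cons]
      push_cast
      omega
    · rw [if_neg h, ih a ha]
      simp only [List.length_cons]
      push_cast
      omega

-- ===== VERDICT (by name: the statement is the Claim_ definition above) =====
theorem solution_spec : Claim_equal_solution := by
  intro nums _
  unfold Spec_solution solution solution_alt
  have hL : (0 : Int) ≤ PySem.Int.floordiv (nums.length : Int) 2 := by
    rw [PySem.Int.floordiv_eq_ediv_of_pos (by omega)]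
    positivity
  rw [capped_count_foldl _ _ 0 hL]
  omega
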